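-- pv_equiv track=rewrite | github.com/Alena1912/homework | lessons/lessons.py | end_of_lesson
-- ===== SOURCE A (Python) =====
-- def end_of_lesson(n: int) -> (int, int):
--     hours = 8
--
--     chtn = 0  # счетчик перемен после четных уроков
--     nech = 0
--     i = 1
--     while i > 0 and i <= n:
--         if i % 2 == 0:
--             chtn += 1
--         else:
--             nech += 1
--         i += 1
--
--     if n % 2 == 0:
--         minutes = 45 * n + nech * 5 + (chtn - 1) * 15
--     else:
--         minutes = 45 * n + (nech - 1) * 5 + chtn * 15
--
--     hours = hours + minutes // 60
--     minutes = minutes % 60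
--
--     return hours, minutes
-- ===== SOURCE B (Python) =====
-- def end_of_lesson(n: int) -> (int, int):
--     # Closed-form break counts instead of the O(n) counting loop.
--     lessons = max(n, 0)
--     nech = (lessons + 1) // 2   # odd-numbered lessons
--     chtn = lessons // 2         # even-numbered lessons
--     if n % 2 == 0:
--         minutes = 45 * n + nech * 5 + (chtn - 1) * 15
--     else:
--         minutes = 45 * n + (nech - 1) * 5 + chtn * 15
--     return 8 + minutes // 60, minutes % 60
-- ===== Notes on version B (the rewrite author's own statement) =====
-- stated objective: faster
-- what changed: Replaces the linear while-loop that tallies odd/even lesson indices with closed-form floor-division counts of the odd and even lessons.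
import Mathlib
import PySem

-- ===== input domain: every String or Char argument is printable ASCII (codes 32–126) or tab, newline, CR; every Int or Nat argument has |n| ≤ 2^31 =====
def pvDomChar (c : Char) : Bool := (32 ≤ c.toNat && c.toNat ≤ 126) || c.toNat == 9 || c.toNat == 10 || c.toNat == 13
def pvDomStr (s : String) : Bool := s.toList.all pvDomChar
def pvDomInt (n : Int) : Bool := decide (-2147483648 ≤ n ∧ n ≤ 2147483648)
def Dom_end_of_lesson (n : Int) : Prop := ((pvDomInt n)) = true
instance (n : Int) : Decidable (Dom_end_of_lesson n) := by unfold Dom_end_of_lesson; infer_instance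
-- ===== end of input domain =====

-- B replaces A's O(n) counting loop by closed-form counts of odd/even lesson indices.
-- ===== PORT A =====
-- the while loop: i counts up from 1 while i > 0 and i <= n, tallying even/odd i
def endLoop (n i chtn nech : Int) : Int × Int :=
  if h : i > 0 ∧ i ≤ n then
    if PySem.Int.mod i 2 = 0 then endLoop n (i + 1) (chtn + 1) nech
    else endLoop n (i + 1) chtn (nech + 1)
  else (chtn, nech)
termination_by (n + 1 - i).toNat
decreasing_by all_goals omega

def end_of_lesson (n : Int) : Int × Int :=
  let hours : Int := 8
  let (chtn, nech) := endLoop n 1 0 0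
  let minutes : Int :=
    if PySem.Int.mod n 2 = 0 then 45 * n + nech * 5 + (chtn - 1) * 15
    else 45 * n + (nech - 1) * 5 + chtn * 15
  (hours + PySem.Int.floordiv minutes 60, PySem.Int.mod minutes 60)

-- ===== PORT B =====
def end_of_lesson_alt (n : Int) : Int × Int :=
  let lessons : Int := max n 0
  let nech : Int := PySem.Int.floordiv (lessons + 1) 2
  let chtn : Int := PySem.Int.floordiv lessons 2
  let minutes : Int :=
    if PySem.Int.mod n 2 = 0 then 45 * n + nech * 5 + (chtn - 1) * 15
    else 45 * n + (nech - 1) * 5 + chtn * 15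
  (8 + PySem.Int.floordiv minutes 60, PySem.Int.mod minutes 60)

-- ===== PRECONDITION & SPEC =====
def Spec_end_of_lesson (n : Int) (out : Int × Int) : Prop := out = end_of_lesson_alt n
instance (n : Int) (out : Int × Int) : Decidable (Spec_end_of_lesson n out) := by unfold Spec_end_of_lesson; infer_instance

-- ===== CLAIM (what is proved, stated in full; the proofs are below) =====
def Claim_equal_end_of_lesson : Prop := ∀ (n : Int), Dom_end_of_lesson n → Spec_end_of_lesson n (end_of_lesson n)

-- ===== LEMMAS AND PROOFS =====

-- ===== VERDICT (by name: the statement is the Claim_ definition above) =====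
-- loop invariant: starting at index i ≥ 1 the loop adds the number of even /
-- odd integers in [i, n] to the accumulators
theorem endLoop_eq (k : Nat) : ∀ (n i chtn nech : Int), (n + 1 - i).toNat = k → 1 ≤ i →
    endLoop n i chtn nech =
      (chtn + (if i ≤ n then n / 2 - (i - 1) / 2 else 0),
       nech + (if i ≤ n then (n + 1) / 2 - i / 2 else 0)) := by
  induction k with
  | zero =>
    intro n i chtn nech hk hi
    rw [endLoop]
    have hni : ¬ i ≤ n := by omega
    simp [hni]
  | succ k ih =>
    intro n i chtn nech hk hi
    rw [endLoop]
    have hin : i ≤ n := by omega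
    rw [dif_pos ⟨by omega, hin⟩]
    have hmod : PySem.Int.mod i 2 = i % 2 := PySem.Int.mod_eq_emod_of_pos (by omega)
    rw [ih n (i + 1) _ _ (by omega) (by omega), ih n (i + 1) _ _ (by omega) (by omega)]
    rcases Int.emod_two_eq_zero_or_one i with h2 | h2 <;>
      simp only [hmod, h2, if_pos hin] <;> split_ifs <;> refine Prod.ext ?_ ?_ <;> simp <;> omega

theorem end_of_lesson_spec : Claim_equal_end_of_lesson := by
  intro n _
  unfold Spec_end_of_lesson end_of_lesson end_of_lesson_alt
  have hl := endLoop_eq (n + 1 - 1).toNat n 1 0 0 rfl (by omega)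
  rw [hl]
  have h1 : PySem.Int.floordiv (max n 0 + 1) 2 = (max n 0 + 1) / 2 :=
    PySem.Int.floordiv_eq_ediv_of_pos (by omega)
  have h2 : PySem.Int.floordiv (max n 0) 2 = (max n 0) / 2 :=
    PySem.Int.floordiv_eq_ediv_of_pos (by omega)
  simp only [h1, h2]
  have hc : (if (1:Int) ≤ n then n / 2 - (1 - 1) / 2 else 0) = (max n 0) / 2 := by
    split_ifs <;> omega
  have he : (if (1:Int) ≤ n then (n + 1) / 2 - 1 / 2 else 0) = (max n 0 + 1) / 2 := by
    split_ifs <;> omega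
  simp only [zero_add, hc, he]
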